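-- pv_equiv track=rewrite | github.com/aarshvir/jyotish-ai | ephemeris-service/main.py | compute_hora_base_for_lagna
-- ===== SOURCE A (Python) =====
-- from typing import Optional, List, Dict, Any
--
-- SIGN_LORD = [
--     "Mars", "Venus", "Mercury", "Moon", "Sun", "Mercury",
--     "Venus", "Mars", "Jupiter", "Saturn", "Saturn", "Jupiter",
-- ]
--
-- SEVEN_GRAHAS = ("Sun", "Moon", "Mars", "Mercury", "Jupiter", "Venus", "Saturn")
--
-- def get_house_lord(lagna_index: int, house_number: int) -> str:
--     """Lord of ``house_number`` (1–12) for ``lagna_index`` (0–11)."""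
--     sign_index = (lagna_index + house_number - 1) % 12
--     return SIGN_LORD[sign_index]
--
-- def get_badhaka_lord(lagna_index: int) -> str:
--     """Badhaka lord: 11th for movable, 9th for fixed, 7th for dual lagna."""
--     MOVABLE = {0, 3, 6, 9}
--     FIXED = {1, 4, 7, 10}
--     if lagna_index in MOVABLE:
--         badhaka_house = 11
--     elif lagna_index in FIXED:
--         badhaka_house = 9
--     else:
--         badhaka_house = 7
--     return get_house_lord(lagna_index, badhaka_house)
--
-- def _houses_ruled_by_planet(lagna_index: int, planet: str) -> List[int]:
--     return [h for h in range(1, 13) if get_house_lord(lagna_index, h) == planet]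
--
-- def _house_hora_weight(h: int) -> int:
--     """Single-house contribution toward hora base (before yogakaraka / blends)."""
--     w = {
--         1: 56, 2: 46, 3: 40, 4: 46, 5: 54, 6: 38,
--         7: 46, 8: 28, 9: 54, 10: 46, 11: 42, 12: 34,
--     }
--     return w.get(h, 40)
--
-- def compute_hora_base_for_lagna(lagna_sign_index: int) -> Dict[str, int]:
--     """
--     Lagna-specific HORA_BASE for the seven classical grahas.
--     Calibrated to Cancer reference (Grandmaster) and key lagna sanity checks.
--     """
--     lagna_index = lagna_sign_index % 12
--     badhaka = get_badhaka_lord(lagna_index)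
--     hora_base: Dict[str, int] = {}
--
--     for planet in SEVEN_GRAHAS:
--         hs_list = _houses_ruled_by_planet(lagna_index, planet)
--         hs = set(hs_list)
--         if not hs:
--             hora_base[planet] = 40
--             continue
--
--         is_ll = 1 in hs
--         non_h1_kendra = hs & {4, 7, 10}
--         tri_59 = hs & {5, 9}
--         is_yk = bool(non_h1_kendra) and bool(tri_59)
--
--         if is_ll and is_yk:
--             s = 58
--         elif is_yk:
--             s = 62
--         elif is_ll:
--             s = 56
--         elif 8 in hs:
--             s = 28
--         elif 9 in hs and (6 in hs or 12 in hs):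
--             s = 62
--         elif hs >= {3, 12}:
--             s = 34
--         else:
--             s = max(_house_hora_weight(h) for h in hs)
--             if planet == badhaka:
--                 s = min(s, 42)
--
--         hora_base[planet] = max(28, min(62, int(s)))
--
--     return hora_base
-- ===== SOURCE B (Python) =====
-- from typing import Dict
--
-- # Fixed zodiac lordships: which signs (0-11) each graha rules, in graha order.
-- LORD_SIGNS = {
--     "Sun": (4,), "Moon": (3,), "Mars": (0, 7), "Mercury": (2, 5),
--     "Jupiter": (8, 11), "Venus": (1, 6), "Saturn": (9, 10),
-- }
--
-- HOUSE_WEIGHT = {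
--     1: 56, 2: 46, 3: 40, 4: 46, 5: 54, 6: 38,
--     7: 46, 8: 28, 9: 54, 10: 46, 11: 42, 12: 34,
-- }
--
-- def compute_hora_base_for_lagna(lagna_sign_index: int) -> Dict[str, int]:
--     L = lagna_sign_index % 12
--     # movable (L%3==0) -> 11th, fixed (L%3==1) -> 9th, dual -> 7th house
--     badhaka_house = (11, 9, 7)[L % 3]
--     badhaka_sign = (L + badhaka_house - 1) % 12
--     out: Dict[str, int] = {}
--     for planet, signs in LORD_SIGNS.items():
--         hs = {(s - L) % 12 + 1 for s in signs}
--         is_ll = 1 in hs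
--         is_yk = bool(hs & {4, 7, 10}) and bool(hs & {5, 9})
--         if is_ll and is_yk:
--             s = 58
--         elif is_yk:
--             s = 62
--         elif is_ll:
--             s = 56
--         elif 8 in hs:
--             s = 28
--         elif 9 in hs and (6 in hs or 12 in hs):
--             s = 62
--         elif hs >= {3, 12}:
--             s = 34
--         else:
--             s = max(HOUSE_WEIGHT[h] for h in hs)
--             if badhaka_sign in signs:
--                 s = min(s, 42)
--         out[planet] = max(28, min(62, s))
--     return out
-- ===== Notes on version B (the rewrite author's own statement) =====
-- stated objective: alternative
-- what changed: B drops the per-planet house scan over repeated get_house_lord calls, instead reading each planet's ruled houses directly off a fixed zodiac-lordship table via modular arithmetic and identifying the badhaka by sign index rather than by lord-name comparison; the unreachable empty-house branch disappears.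
import Mathlib
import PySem

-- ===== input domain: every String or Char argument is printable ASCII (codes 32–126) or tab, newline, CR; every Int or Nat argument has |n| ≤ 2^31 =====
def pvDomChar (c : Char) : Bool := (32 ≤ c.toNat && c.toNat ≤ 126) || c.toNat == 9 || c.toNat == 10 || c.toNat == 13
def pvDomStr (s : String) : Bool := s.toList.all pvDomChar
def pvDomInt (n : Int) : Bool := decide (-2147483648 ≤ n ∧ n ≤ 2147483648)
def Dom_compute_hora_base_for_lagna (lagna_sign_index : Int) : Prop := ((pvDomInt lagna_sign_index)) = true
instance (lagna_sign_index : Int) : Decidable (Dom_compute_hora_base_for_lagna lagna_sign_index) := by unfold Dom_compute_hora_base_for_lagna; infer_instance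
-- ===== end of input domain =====

-- B computes each planet's ruled houses arithmetically from the fixed zodiac lordship table
-- instead of scanning houses 1..12 per planet; the resulting assoc list (dict) is proved equal.

-- ===== PORT A =====
def pvSignLord : List String :=
  ["Mars", "Venus", "Mercury", "Moon", "Sun", "Mercury",
   "Venus", "Mars", "Jupiter", "Saturn", "Saturn", "Jupiter"]

def pvSevenGrahas : List String :=
  ["Sun", "Moon", "Mars", "Mercury", "Jupiter", "Venus", "Saturn"]

-- SIGN_LORD[(lagna+h-1)%12]; the index is always in range, getD "" is never taken
def pvGetHouseLord (lagna_index house_number : Int) : String :=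
  (PySem.List.pyGet? pvSignLord (PySem.Int.mod (lagna_index + house_number - 1) 12)).getD ""

def pvGetBadhakaLord (lagna_index : Int) : String :=
  let badhaka_house : Int :=
    if PySem.Set.contains (PySem.Set.ofList [(0:Int),3,6,9]) lagna_index then 11
    else if PySem.Set.contains (PySem.Set.ofList [(1:Int),4,7,10]) lagna_index then 9
    else 7
  pvGetHouseLord lagna_index badhaka_house

def pvHousesRuledByPlanet (lagna_index : Int) (planet : String) : List Int :=
  (PySem.List.pyRange 1 13 1).filter (fun h => pvGetHouseLord lagna_index h == planet)

def pvHouseHoraWeight (h : Int) : Int :=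
  PySem.Dict.getD (PySem.Dict.ofList
    [((1:Int),(56:Int)), (2,46), (3,40), (4,46), (5,54), (6,38),
     (7,46), (8,28), (9,54), (10,46), (11,42), (12,34)]) h 40

-- the body of A's loop over SEVEN_GRAHAS (lagna_index = lagna_sign_index % 12)
def pvAbody (lagna_index : Int) : List (String × Int) :=
  let badhaka := pvGetBadhakaLord lagna_index
  let d := pvSevenGrahas.foldl (fun (d : PySem.Dict String Int) planet =>
      let hs_list := pvHousesRuledByPlanet lagna_index planet
      let hs : PySem.Set Int := PySem.Set.ofList hs_list
      if hs.isEmpty then d.insert planet 40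
      else
        let is_ll := PySem.Set.contains hs 1
        let non_h1_kendra := PySem.Set.inter hs (PySem.Set.ofList [(4:Int),7,10])
        let tri_59 := PySem.Set.inter hs (PySem.Set.ofList [(5:Int),9])
        let is_yk := !non_h1_kendra.isEmpty && !tri_59.isEmpty
        let s : Int :=
          if is_ll && is_yk then 58
          else if is_yk then 62
          else if is_ll then 56
          else if PySem.Set.contains hs 8 then 28
          else if PySem.Set.contains hs 9 &&
                  (PySem.Set.contains hs 6 || PySem.Set.contains hs 12) then 62
          else if PySem.Set.issuperset hs (PySem.Set.ofList [(3:Int),12]) then 34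
          else
            -- max over a set of weights: value is order-independent; hs nonempty on this branch
            let m := ((hs.map pvHouseHoraWeight).max?).getD 0
            if planet == badhaka then min m 42 else m
        d.insert planet (max 28 (min 62 s)))
    PySem.Dict.empty
  d.items

def compute_hora_base_for_lagna (lagna_sign_index : Int) : List (String × Int) :=
  pvAbody (PySem.Int.mod lagna_sign_index 12)

-- ===== PORT B =====
def pvLordSigns : List (String × List Int) :=
  [("Sun", [4]), ("Moon", [3]), ("Mars", [0, 7]), ("Mercury", [2, 5]),
   ("Jupiter", [8, 11]), ("Venus", [1, 6]), ("Saturn", [9, 10])]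

def pvHouseWeightB : PySem.Dict Int Int :=
  PySem.Dict.ofList
    [((1:Int),(56:Int)), (2,46), (3,40), (4,46), (5,54), (6,38),
     (7,46), (8,28), (9,54), (10,46), (11,42), (12,34)]

-- the body of B's loop over LORD_SIGNS (L = lagna_sign_index % 12)
def pvBbody (L : Int) : List (String × Int) :=
  let badhaka_house := (PySem.List.pyGet? ([11, 9, 7] : List Int) (PySem.Int.mod L 3)).getD 0
  let badhaka_sign := PySem.Int.mod (L + badhaka_house - 1) 12
  let d := pvLordSigns.foldl (fun (d : PySem.Dict String Int) pl =>
      let planet := pl.1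
      let signs := pl.2
      let hs : PySem.Set Int := PySem.Set.ofList (signs.map (fun s => PySem.Int.mod (s - L) 12 + 1))
      let is_ll := PySem.Set.contains hs 1
      let is_yk := !(PySem.Set.inter hs (PySem.Set.ofList [(4:Int),7,10])).isEmpty &&
                   !(PySem.Set.inter hs (PySem.Set.ofList [(5:Int),9])).isEmpty
      let s : Int :=
        if is_ll && is_yk then 58
        else if is_yk then 62
        else if is_ll then 56
        else if PySem.Set.contains hs 8 then 28
        else if PySem.Set.contains hs 9 &&
                (PySem.Set.contains hs 6 || PySem.Set.contains hs 12) then 62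
        else if PySem.Set.issuperset hs (PySem.Set.ofList [(3:Int),12]) then 34
        else
          let m := ((hs.map (fun h => pvHouseWeightB.getD h 40)).max?).getD 0
          if signs.contains badhaka_sign then min m 42 else m
      d.insert planet (max 28 (min 62 s)))
    PySem.Dict.empty
  d.items

def compute_hora_base_for_lagna_alt (lagna_sign_index : Int) : List (String × Int) :=
  pvBbody (PySem.Int.mod lagna_sign_index 12)

-- ===== PRECONDITION & SPEC =====
def Spec_compute_hora_base_for_lagna (lagna_sign_index : Int) (out : List (String × Int)) : Prop := out = compute_hora_base_for_lagna_alt lagna_sign_index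
instance (lagna_sign_index : Int) (out : List (String × Int)) : Decidable (Spec_compute_hora_base_for_lagna lagna_sign_index out) := by unfold Spec_compute_hora_base_for_lagna; infer_instance

-- ===== CLAIM (what is proved, stated in full; the proofs are below) =====
def Claim_equal_compute_hora_base_for_lagna : Prop := ∀ (lagna_sign_index : Int), Dom_compute_hora_base_for_lagna lagna_sign_index → Spec_compute_hora_base_for_lagna lagna_sign_index (compute_hora_base_for_lagna lagna_sign_index)

-- ===== LEMMAS AND PROOFS =====
theorem pvBody_eq (L : Int) (h0 : 0 ≤ L) (h12 : L < 12) : pvAbody L = pvBbody L := by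
  interval_cases L <;> decide

-- ===== VERDICT (by name: the statement is the Claim_ definition above) =====
theorem compute_hora_base_for_lagna_spec : Claim_equal_compute_hora_base_for_lagna := by
  intro n _
  unfold Spec_compute_hora_base_for_lagna compute_hora_base_for_lagna compute_hora_base_for_lagna_alt
  have hpos : (0:Int) < 12 := by norm_num
  rw [PySem.Int.mod_eq_emod_of_pos hpos]
  exact pvBody_eq _ (Int.emod_nonneg n (by norm_num)) (Int.emod_lt_of_pos n hpos)
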